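-- pv_equiv track=rewrite | github.com/xiaomei7/Coursera_Introduction-to-Discrete-Mathematics-for-Computer-Science | CP_Week1/Quiz.py | two_three_dividsible
-- ===== SOURCE A (Python) =====
-- def two_three_dividsible(n):
-- 	div_two, div_three, div_two_three = 0, 0, 0
-- 	for i in range(1, n+1):
-- 		if i % 2 == 0:
-- 			div_two += 1
-- 		if i % 3 == 0:
-- 			div_three += 1
-- 		if i % 2 == 0 and i % 3 == 0:
-- 			div_two_three += 1
--
-- 	return div_two + div_three - div_two_three
-- ===== SOURCE B (Python) =====
-- def two_three_dividsible(n):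
--     # closed-form inclusion-exclusion; the count is 0 for n < 0 (empty range)
--     if n < 0:
--         return 0
--     return n // 2 + n // 3 - n // 6
-- ===== Notes on version B (the rewrite author's own statement) =====
-- stated objective: faster
-- what changed: Replaced the O(n) counting loop by the O(1) inclusion-exclusion closed form n//2 + n//3 - n//6 (0 for negative n, where the range is empty).
import Mathlib
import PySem

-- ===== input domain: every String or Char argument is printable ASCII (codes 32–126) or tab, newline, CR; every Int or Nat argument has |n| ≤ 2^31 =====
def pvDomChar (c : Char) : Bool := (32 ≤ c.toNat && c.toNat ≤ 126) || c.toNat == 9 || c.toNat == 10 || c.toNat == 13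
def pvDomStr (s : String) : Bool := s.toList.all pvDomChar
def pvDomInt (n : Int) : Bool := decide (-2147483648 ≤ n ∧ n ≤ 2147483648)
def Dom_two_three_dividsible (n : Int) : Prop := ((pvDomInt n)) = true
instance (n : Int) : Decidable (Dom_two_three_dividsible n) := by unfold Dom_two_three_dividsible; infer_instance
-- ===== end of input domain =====

-- B replaces A's O(n) counting loop by the O(1) inclusion-exclusion closed form.

-- ===== PORT A =====
def two_three_dividsible (n : Int) : Int :=
  let s := (PySem.List.pyRange 1 (n + 1) 1).foldl
    (fun (acc : Int × Int × Int) i =>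
      let a := if PySem.Int.mod i 2 = 0 then acc.1 + 1 else acc.1
      let b := if PySem.Int.mod i 3 = 0 then acc.2.1 + 1 else acc.2.1
      let c := if PySem.Int.mod i 2 = 0 ∧ PySem.Int.mod i 3 = 0 then acc.2.2 + 1 else acc.2.2
      (a, b, c)) (0, 0, 0)
  s.1 + s.2.1 - s.2.2

-- ===== PORT B =====
def two_three_dividsible_alt (n : Int) : Int :=
  if n < 0 then 0
  else PySem.Int.floordiv n 2 + PySem.Int.floordiv n 3 - PySem.Int.floordiv n 6

-- ===== PRECONDITION & SPEC =====
def Spec_two_three_dividsible (n : Int) (out : Int) : Prop := out = two_three_dividsible_alt n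
instance (n : Int) (out : Int) : Decidable (Spec_two_three_dividsible n out) := by unfold Spec_two_three_dividsible; infer_instance

-- ===== CLAIM (what is proved, stated in full; the proofs are below) =====
def Claim_equal_two_three_dividsible : Prop := ∀ (n : Int), Dom_two_three_dividsible n → Spec_two_three_dividsible n (two_three_dividsible n)

-- ===== LEMMAS AND PROOFS =====

-- The loop invariant: after processing 1..m the counters hold a+m/2, b+m/3, c+m/6.
theorem pv_loop_inv (m : Nat) (a b c : Int) :
    (PySem.List.pyRange 1 ((m : Int) + 1) 1).foldl
      (fun (acc : Int × Int × Int) i =>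
        let a := if PySem.Int.mod i 2 = 0 then acc.1 + 1 else acc.1
        let b := if PySem.Int.mod i 3 = 0 then acc.2.1 + 1 else acc.2.1
        let c := if PySem.Int.mod i 2 = 0 ∧ PySem.Int.mod i 3 = 0 then acc.2.2 + 1 else acc.2.2
        (a, b, c)) (a, b, c)
    = (a + (m : Int) / 2, b + (m : Int) / 3, c + (m : Int) / 6) := by
  induction m with
  | zero =>
      rw [show ((0 : Nat) : Int) + 1 = 1 by norm_num,
        PySem.List.pyRange_one_eq_nil (by omega)]
      simp
  | succ m ih =>
      rw [show ((m + 1 : Nat) : Int) + 1 = ((m : Int) + 1) + 1 by push_cast; ring,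
        PySem.List.pyRange_one_succ_right (by omega), List.foldl_append, ih]
      simp only [List.foldl_cons, List.foldl_nil]
      have h2 : PySem.Int.mod ((m : Int) + 1) 2 = ((m : Int) + 1) % 2 :=
        PySem.Int.mod_eq_emod_of_pos (by omega)
      have h3 : PySem.Int.mod ((m : Int) + 1) 3 = ((m : Int) + 1) % 3 :=
        PySem.Int.mod_eq_emod_of_pos (by omega)
      simp only [h2, h3, ite_and]
      by_cases p2 : ((m : Int) + 1) % 2 = 0 <;> by_cases p3 : ((m : Int) + 1) % 3 = 0
      · have p6 : ((m : Int) + 1) % 6 = 0 := by omega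
        simp only [if_pos p2, if_pos p3, Prod.mk.injEq, Nat.cast_add, Nat.cast_one]
        exact ⟨by omega, by omega, by omega⟩
      · have p6 : ¬((m : Int) + 1) % 6 = 0 := by omega
        simp only [if_pos p2, if_neg p3, Prod.mk.injEq, Nat.cast_add, Nat.cast_one]
        exact ⟨by omega, by omega, by omega⟩
      · have p6 : ¬((m : Int) + 1) % 6 = 0 := by omega
        simp only [if_neg p2, if_pos p3, Prod.mk.injEq, Nat.cast_add, Nat.cast_one]
        exact ⟨by omega, by omega, by omega⟩
      · have p6 : ¬((m : Int) + 1) % 6 = 0 := by omega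
        simp only [if_neg p2, if_neg p3, Prod.mk.injEq, Nat.cast_add, Nat.cast_one]
        exact ⟨by omega, by omega, by omega⟩

-- ===== VERDICT (by name: the statement is the Claim_ definition above) =====
theorem two_three_dividsible_spec : Claim_equal_two_three_dividsible := by
  intro n _
  unfold Spec_two_three_dividsible two_three_dividsible two_three_dividsible_alt
  by_cases hn : n < 0
  · rw [PySem.List.pyRange_one_eq_nil (by omega)]
    simp [hn]
  · rw [not_lt] at hn
    obtain ⟨m, rfl⟩ := Int.eq_ofNat_of_zero_le hn
    rw [pv_loop_inv]
    simp only [if_neg (by omega : ¬ ((m : Int) < 0))]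
    rw [PySem.Int.floordiv_eq_ediv_of_pos (by norm_num),
      PySem.Int.floordiv_eq_ediv_of_pos (by norm_num),
      PySem.Int.floordiv_eq_ediv_of_pos (by norm_num)]
    ring
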